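-- pv_equiv track=rewrite | github.com/ZijieJin/scFusion | bin/FindHomoPattern_RAM.py | Findbrkpnt_SWResult
-- ===== SOURCE A (Python) =====
-- def Findbrkpnt_SWResult(string, tailpos, halfwidth):
--     aa = []
--     for i in range(len(string)):
--         if string[i] != '-':
--             aa.append(string[i])
--     if tailpos < halfwidth:
--         return len(string) + halfwidth - tailpos
--     if tailpos - len(aa) >= halfwidth:
--         return - tailpos + len(aa) + halfwidth
--     j = len(string) - 1
--     start = tailpos
--     while tailpos > halfwidth:
--         if string[j] != '-':
--             start -= 1
--         j -= 1
--         if start == halfwidth: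
--             break
--     return j + 1
-- ===== SOURCE B (Python) =====
-- def Findbrkpnt_SWResult(string, tailpos, halfwidth):
--     positions = [i for i, c in enumerate(string) if c != '-']
--     positions.append(len(string))
--     n = len(positions) - 1
--     if tailpos < halfwidth:
--         return len(string) + halfwidth - tailpos
--     if tailpos - n >= halfwidth:
--         return - tailpos + n + halfwidth
--     k = tailpos - halfwidth
--     return positions[n - k]
-- ===== Notes on version B (the rewrite author's own statement) =====
-- stated objective: alternative
-- what changed: Replaces the backward decrementing while-loop over the string with a forward index table of non-dash positions (plus a sentinel len(string)) and a single direct lookup positions[n-k].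
import Mathlib
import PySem

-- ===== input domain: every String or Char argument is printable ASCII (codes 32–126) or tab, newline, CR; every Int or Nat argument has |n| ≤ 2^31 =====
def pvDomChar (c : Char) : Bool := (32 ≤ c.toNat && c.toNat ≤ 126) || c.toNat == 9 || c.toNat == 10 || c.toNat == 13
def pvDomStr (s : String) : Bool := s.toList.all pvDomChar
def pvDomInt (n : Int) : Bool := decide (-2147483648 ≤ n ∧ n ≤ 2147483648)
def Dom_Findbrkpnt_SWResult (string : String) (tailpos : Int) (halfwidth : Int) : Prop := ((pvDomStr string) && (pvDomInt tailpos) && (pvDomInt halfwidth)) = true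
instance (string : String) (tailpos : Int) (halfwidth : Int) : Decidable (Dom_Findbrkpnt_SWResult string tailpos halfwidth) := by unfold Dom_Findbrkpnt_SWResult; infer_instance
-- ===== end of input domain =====

-- B replaces A's backward decrementing while-loop with a forward index table of non-dash
-- positions (plus a sentinel len(string)) and one direct lookup; same cost, different structure.

-- ===== PORT A =====
-- the aa-building loop: for i in range(len(string)): if string[i] != '-': aa.append(string[i])
def pvAaFold (s : List Char) : List Char :=
  (List.range s.length).foldl
    (fun aa i => if s.getD i '-' ≠ '-' then aa ++ [s.getD i '-'] else aa) []

-- the while-loop, recursion on j (a Nat index counting down). The break returns j+1 where j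
-- has already been decremented, i.e. the value of j at the top of the iteration; hence `(j:Int)`.
-- The `| 0 => 0` fallback (Python would index negatively) is unreachable: the loop is entered
-- only when 1 ≤ tailpos - halfwidth < len(aa), so the break fires at a non-negative index.
def pvLoopA (s : List Char) (halfwidth : Int) (j : Nat) (start : Int) : Int :=
  if (if s.getD j '-' ≠ '-' then start - 1 else start) = halfwidth then (j : Int)
  else
    match j with
    | 0 => 0
    | j' + 1 => pvLoopA s halfwidth j' (if s.getD j '-' ≠ '-' then start - 1 else start)

def Findbrkpnt_SWResult (string : String) (tailpos : Int) (halfwidth : Int) : Int :=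
  let s := string.toList
  let aa := pvAaFold s
  if tailpos < halfwidth then (s.length : Int) + halfwidth - tailpos
  else if tailpos - aa.length ≥ halfwidth then - tailpos + aa.length + halfwidth
  else if tailpos > halfwidth then pvLoopA s halfwidth (s.length - 1) tailpos
  else ((s.length : Int) - 1) + 1   -- while-guard false immediately: return j + 1

-- ===== PORT B =====
-- positions = [i for i, c in enumerate(string) if c != '-'] ; positions.append(len(string))
-- positions[n - k]: the index n - k is provably in range in this branch (0 ≤ n-k ≤ n),
-- so the total pyGetD form is exact here.
def Findbrkpnt_SWResult_alt (string : String) (tailpos : Int) (halfwidth : Int) : Int :=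
  let s := string.toList
  let positions : List Int :=
    ((PySem.List.enumerate s 0).filter (fun p => p.2 ≠ '-')).map (fun p => p.1)
      ++ [(s.length : Int)]
  let n : Int := (positions.length : Int) - 1
  if tailpos < halfwidth then (s.length : Int) + halfwidth - tailpos
  else if tailpos - n ≥ halfwidth then - tailpos + n + halfwidth
  else PySem.List.pyGetD positions (n - (tailpos - halfwidth)) 0

-- ===== PRECONDITION & SPEC =====
def Spec_Findbrkpnt_SWResult (string : String) (tailpos : Int) (halfwidth : Int) (out : Int) : Prop := out = Findbrkpnt_SWResult_alt string tailpos halfwidth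
instance (string : String) (tailpos : Int) (halfwidth : Int) (out : Int) : Decidable (Spec_Findbrkpnt_SWResult string tailpos halfwidth out) := by unfold Spec_Findbrkpnt_SWResult; infer_instance

-- ===== CLAIM (what is proved, stated in full; the proofs are below) =====
def Claim_equal_Findbrkpnt_SWResult : Prop := ∀ (string : String) (tailpos : Int) (halfwidth : Int), Dom_Findbrkpnt_SWResult string tailpos halfwidth → Spec_Findbrkpnt_SWResult string tailpos halfwidth (Findbrkpnt_SWResult string tailpos halfwidth)

-- ===== LEMMAS AND PROOFS =====

-- the list of non-dash indices below j
def pvIdxs (s : List Char) (j : Nat) : List Nat :=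
  (List.range j).filter (fun i => s.getD i '-' ≠ '-')

lemma pvIdxs_succ (s : List Char) (j : Nat) :
    pvIdxs s (j + 1) =
      pvIdxs s j ++ (if s.getD j '-' ≠ '-' then [j] else []) := by
  simp [pvIdxs, List.range_succ, List.filter_append]
  split_ifs with h <;> simp [h]

lemma pvAaFold_length (s : List Char) :
    (pvAaFold s).length = (pvIdxs s s.length).length := by
  unfold pvAaFold
  generalize s.length = n
  induction n with
  | zero => simp [pvIdxs]
  | succ n ih =>
      rw [List.range_succ, List.foldl_append, pvIdxs_succ,
          List.foldl_cons, List.foldl_nil]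
      by_cases h : s.getD n '-' ≠ '-'
      · rw [if_pos h, if_pos h, List.length_append, List.length_append, ih]
        simp
      · rw [if_neg h, if_neg h, List.append_nil]
        exact ih

lemma pvIdxs_zero (s : List Char) : pvIdxs s 0 = [] := by simp [pvIdxs]

lemma pvLoopA_eq (s : List Char) (halfwidth : Int) :
    ∀ (j k : Nat), 1 ≤ k → k ≤ (pvIdxs s (j + 1)).length →
      pvLoopA s halfwidth j (halfwidth + k) =
        (((pvIdxs s (j + 1)).getD ((pvIdxs s (j + 1)).length - k) 0 : Nat) : Int) := by
  intro j
  induction j with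
  | zero =>
      intro k hk1 hk2
      rw [pvIdxs_succ] at hk2 ⊢
      by_cases h : s.getD 0 '-' ≠ '-'
      · rw [if_pos h] at hk2 ⊢
        rw [pvIdxs_zero] at hk2 ⊢
        have hk : k = 1 := by simp at hk2; omega
        subst hk
        unfold pvLoopA
        rw [if_pos h]
        have : halfwidth + ((1 : Nat) : Int) - 1 = halfwidth := by push_cast; ring
        rw [this, if_pos rfl]
        simp
      · rw [if_neg h, pvIdxs_zero] at hk2
        simp at hk2
        omega
  | succ j ih =>
      intro k hk1 hk2
      rw [pvIdxs_succ] at hk2 ⊢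
      by_cases h : s.getD (j + 1) '-' ≠ '-'
      · rw [if_pos h] at hk2 ⊢
        rw [List.length_append, List.length_singleton] at hk2 ⊢
        by_cases hk : k = 1
        · subst hk
          unfold pvLoopA
          rw [if_pos h]
          have : halfwidth + ((1 : Nat) : Int) - 1 = halfwidth := by push_cast; ring
          rw [this, if_pos rfl]
          have hidx : (pvIdxs s (j + 1)).length + 1 - 1 = (pvIdxs s (j + 1)).length := by omega
          rw [hidx, List.getD_eq_getElem?_getD, List.getElem?_append_right (by omega)]
          simp
        · have hk2' : 2 ≤ k := by omega
          unfold pvLoopA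
          rw [if_pos h]
          have hne : halfwidth + (k : Int) - 1 ≠ halfwidth := by intro hc; omega
          rw [if_neg hne]
          have hstep : halfwidth + (k : Int) - 1 = halfwidth + ((k - 1 : Nat) : Int) := by
            push_cast [Nat.cast_sub (by omega : 1 ≤ k)]; ring
          rw [hstep]
          show pvLoopA s halfwidth j (halfwidth + ((k - 1 : Nat) : Int)) = _
          rw [ih (k - 1) (by omega) (by omega)]
          have hlt : (pvIdxs s (j + 1)).length + 1 - k < (pvIdxs s (j + 1)).length := by omega
          rw [List.getD_eq_getElem?_getD, List.getD_eq_getElem?_getD,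
              List.getElem?_append_left hlt]
          have heq : (pvIdxs s (j + 1)).length + 1 - k = (pvIdxs s (j + 1)).length - (k - 1) := by
            omega
          rw [heq]
      · rw [if_neg h, List.append_nil] at hk2 ⊢
        unfold pvLoopA
        rw [if_neg h]
        have hne : halfwidth + (k : Int) ≠ halfwidth := by intro hc; omega
        rw [if_neg hne]
        show pvLoopA s halfwidth j (halfwidth + (k : Int)) = _
        exact ih k hk1 hk2

-- B's position table is the non-dash index list (as Ints)
lemma pvPositions_eq (s : List Char) :
    ((PySem.List.enumerate s 0).filter (fun p => p.2 ≠ '-')).map (fun p => p.1) =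
      List.map (fun (i : Nat) => (i : Int)) (pvIdxs s s.length) := by
  rw [PySem.List.enumerate_eq_map_pyRange s '-']
  rw [show PySem.List.len s = ((s.length : Nat) : Int) from rfl]
  rw [PySem.List.pyRange_zero_natCast]
  unfold pvIdxs
  simp only [List.filter_map, List.map_map, Function.comp_def, PySem.List.pyGetD_natCast]

-- ===== VERDICT (by name: the statement is the Claim_ definition above) =====
theorem Findbrkpnt_SWResult_spec : Claim_equal_Findbrkpnt_SWResult := by
  intro string tailpos halfwidth _
  unfold Spec_Findbrkpnt_SWResult Findbrkpnt_SWResult Findbrkpnt_SWResult_alt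
  simp only []
  set s := string.toList with hs
  have hpos :
      (((PySem.List.enumerate s 0).filter (fun p => p.2 ≠ '-')).map (fun p => p.1)
        ++ [(s.length : Int)]).length = (pvIdxs s s.length).length + 1 := by
    rw [List.length_append, pvPositions_eq]; simp
  set N := (pvIdxs s s.length).length with hN
  have haa : (pvAaFold s).length = N := pvAaFold_length s
  rw [haa, hpos]
  have hn : (((N + 1 : Nat) : Int)) - 1 = (N : Int) := by push_cast; ring
  rw [hn]
  by_cases h1 : tailpos < halfwidth
  · simp [h1]
  · rw [if_neg h1, if_neg h1]
    by_cases h2 : tailpos - (N : Int) ≥ halfwidth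
    · rw [if_pos h2, if_pos h2]
    · rw [if_neg h2, if_neg h2]
      have hkge : 0 ≤ tailpos - halfwidth := by omega
      have hklt : tailpos - halfwidth < (N : Int) := by omega
      by_cases h3 : tailpos > halfwidth
      · rw [if_pos h3]
        set k : Nat := (tailpos - halfwidth).toNat with hk
        have hkval : tailpos = halfwidth + (k : Int) := by omega
        have hk1 : 1 ≤ k := by omega
        have hkN : k ≤ N := by omega
        have hlen : 1 ≤ s.length := by
          by_contra hc
          have : s.length = 0 := by omega
          have : N = 0 := by simp [hN, pvIdxs, this]
          omega
        have hj : s.length - 1 + 1 = s.length := by omega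
        rw [hkval]
        rw [pvLoopA_eq s halfwidth (s.length - 1) k hk1 (by rw [hj]; exact hkN)]
        rw [hj]
        -- B side: pyGetD at index N - k, inside the map-prefix
        have hidx : ((N : Int) - (halfwidth + (k : Int) - halfwidth)) = ((N - k : Nat) : Int) := by
          push_cast [Nat.cast_sub hkN]; ring
        rw [hidx]
        rw [PySem.List.pyGetD_natCast]
        rw [List.getD_eq_getElem?_getD, List.getD_eq_getElem?_getD]
        rw [List.getElem?_append_left (by rw [pvPositions_eq, List.length_map]; omega)]
        rw [pvPositions_eq]
        rw [List.getElem?_map]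
        have hlt2 : N - k < (pvIdxs s s.length).length := by omega
        rw [List.getElem?_eq_getElem hlt2]
        rfl
      · rw [if_neg h3]
        have h4 : tailpos = halfwidth := by omega
        have hN1 : 1 ≤ N := by omega
        have hlen : 1 ≤ s.length := by
          by_contra hc
          have h0 : s.length = 0 := by omega
          have : N = 0 := by simp [hN, pvIdxs, h0]
          omega
        rw [h4]
        have hidx : ((N : Int) - (halfwidth - halfwidth)) = ((N : Nat) : Int) := by ring
        rw [hidx, PySem.List.pyGetD_natCast]
        rw [List.getD_eq_getElem?_getD]
        rw [List.getElem?_append_right (by rw [pvPositions_eq, List.length_map])]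
        have : N - (((PySem.List.enumerate s 0).filter (fun p => p.2 ≠ '-')).map (fun p => p.1)).length = 0 := by
          rw [pvPositions_eq, List.length_map]; omega
        rw [this]
        have hone : ([((s.length : Nat) : Int)])[(0 : Nat)]?.getD 0 = ((s.length : Nat) : Int) := rfl
        rw [hone]
        omega
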